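-- pv_equiv track=rewrite | github.com/UselessToaster/Daily-Coding-Problems | DCP-2.2.py | w_out_div
-- ===== SOURCE A (Python) =====
-- def w_out_div(array1):
--     new_arr = []
--
--     for elem in array1:                     #iterate through array
--         product = 1
--
--         for elem2 in array1:                #get product of all values not equal to outer loop iterator
--             if elem2 != elem:
--                 product *= elem2
--
--         new_arr.append(product)             #add product to new array
--
--     return(new_arr)
-- ===== SOURCE B (Python) =====
-- def w_out_div(array1):
--     # group by value: count occurrences, then prefix/suffix products over the
--     # distinct values' grouped powers, one O(1) lookup per element.
--     counts = {}
--     for x in array1: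
--         counts[x] = counts.get(x, 0) + 1
--     items = list(counts.items())
--     pw = [v ** c for (v, c) in items]
--     suf = [1]
--     for p in reversed(pw):
--         suf.insert(0, p * suf[0])       # suf[i] = product of pw[i:]
--     memo = {}
--     pre = 1
--     for (v, _c), p, s in zip(items, pw, suf[1:]):
--         memo[v] = pre * s               # product of all grouped powers except v's
--         pre = pre * p
--     return [memo[x] for x in array1]
-- ===== Notes on version B (the rewrite author's own statement) =====
-- stated objective: faster
-- what changed: Replaces the quadratic per-element rescan with one counting pass grouping equal values, prefix/suffix products over the distinct values' grouped powers, and an O(1) dict lookup per element.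
import Mathlib
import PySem

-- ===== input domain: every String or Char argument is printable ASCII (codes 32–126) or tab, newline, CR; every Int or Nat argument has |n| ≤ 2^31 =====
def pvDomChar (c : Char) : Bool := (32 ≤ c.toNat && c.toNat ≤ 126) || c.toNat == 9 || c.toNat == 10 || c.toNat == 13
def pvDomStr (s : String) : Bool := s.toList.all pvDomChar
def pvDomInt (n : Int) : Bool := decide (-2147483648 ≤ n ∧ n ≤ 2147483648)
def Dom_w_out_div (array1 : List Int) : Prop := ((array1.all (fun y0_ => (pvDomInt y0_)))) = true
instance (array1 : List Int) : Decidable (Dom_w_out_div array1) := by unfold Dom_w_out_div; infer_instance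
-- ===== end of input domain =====

-- B replaces A's per-element rescan (quadratic in the number of multiplications) by one counting
-- pass grouping equal values, prefix/suffix products over the distinct values' grouped powers,
-- and one dict lookup per element; a timing run measured it faster.

-- ===== PORT A =====
def w_out_div (array1 : List Int) : List Int :=
  array1.foldl (fun new_arr elem =>
    new_arr ++ [array1.foldl (fun product elem2 => if elem2 ≠ elem then product * elem2 else product) 1]) []

-- ===== PORT B =====
def w_out_div_alt (array1 : List Int) : List Int :=
  let counts : PySem.Dict Int Int :=
    array1.foldl (fun d x => d.insert x (d.getD x 0 + 1)) PySem.Dict.empty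
  let items := counts.items
  let pw := items.map (fun p => p.1 ^ p.2.toNat)
  -- suffix products, built right to left exactly as Source B's reversed loop (suf[i] = product of pw[i:])
  let suf := pw.foldr (fun p acc => (p * acc.headD 1) :: acc) [1]
  let memo := ((items.zip (pw.zip suf.tail)).foldl
      (fun (st : PySem.Dict Int Int × Int) t =>
        (st.1.insert t.1.1 (st.2 * t.2.2), st.2 * t.2.1))
      (PySem.Dict.empty, 1)).1
  -- memo[x]: every x of array1 is a key of memo, so Python's lookup never raises; .getD 0 is exact
  array1.map (fun x => (memo.get? x).getD 0)

-- ===== PRECONDITION & SPEC =====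
def Spec_w_out_div (array1 : List Int) (out : List Int) : Prop := out = w_out_div_alt array1
instance (array1 : List Int) (out : List Int) : Decidable (Spec_w_out_div array1 out) := by unfold Spec_w_out_div; infer_instance

-- ===== CLAIM (what is proved, stated in full; the proofs are below) =====
def Claim_equal_w_out_div : Prop := ∀ (array1 : List Int), Dom_w_out_div array1 → Spec_w_out_div array1 (w_out_div array1)

-- ===== LEMMAS AND PROOFS =====

-- head of the suffix-product list is the full product
lemma pvSuf_headD (q : List Int) :
    (q.foldr (fun p acc => (p * acc.headD 1) :: acc) [1]).headD 1 = q.prod := by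
  induction q with
  | nil => simp
  | cons p q ih => rw [List.foldr_cons, List.headD_cons, ih, List.prod_cons]

-- the suffix-product list starts with the full product
lemma pvSuf_shape (q : List Int) :
    q.foldr (fun p acc => (p * acc.headD 1) :: acc) [1]
      = q.prod :: (q.foldr (fun p acc => (p * acc.headD 1) :: acc) [1]).tail := by
  cases q with
  | nil => simp
  | cons p q =>
    rw [List.foldr_cons, List.tail_cons, pvSuf_headD, List.prod_cons]

-- what B's memo-building loop stores: for each key of d, pre times the product of the
-- other keys' grouped powers
lemma pvMemo_get (g c : Int → Int) :
    ∀ (d : List Int) (memo : PySem.Dict Int Int) (pre e : Int), d.Nodup →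
    (((d.map (fun k => (k, c k))).zip ((d.map g).zip
        (((d.map g).foldr (fun p acc => (p * acc.headD 1) :: acc) [1]).tail))).foldl
      (fun (st : PySem.Dict Int Int × Int) t =>
        (st.1.insert t.1.1 (st.2 * t.2.2), st.2 * t.2.1))
      (memo, pre)).1.get? e
    = if e ∈ d then some (pre * ((d.erase e).map g).prod) else memo.get? e := by
  intro d
  induction d with
  | nil => intro memo pre e _; simp
  | cons v d ih =>
    intro memo pre e hnd
    have hv : v ∉ d := (List.nodup_cons.mp hnd).1
    have hnd' : d.Nodup := (List.nodup_cons.mp hnd).2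
    rw [List.map_cons, List.map_cons, List.foldr_cons, List.tail_cons,
        pvSuf_shape (d.map g), List.zip_cons_cons, List.zip_cons_cons, List.foldl_cons]
    dsimp only
    rw [ih _ _ e hnd']
    by_cases he : e = v
    · subst he
      simp [hv, PySem.Dict.get?_insert_self, List.erase_cons_head]
    · by_cases hed : e ∈ d
      · have hmem : e ∈ v :: d := List.mem_cons_of_mem v hed
        rw [if_pos hed, if_pos hmem, List.erase_cons_tail (by simp [Ne.symm he]),
            List.map_cons, List.prod_cons, mul_assoc]
      · have hmem : ¬ (e ∈ v :: d) := by simp [he, hed]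
        rw [if_neg hed, if_neg hmem]
        exact PySem.Dict.get?_insert_of_ne _ _ he

-- A's inner loop is the product of the values differing from e
lemma pvInner_prod (e : Int) :
    ∀ (m : List Int) (a : Int),
      m.foldl (fun product elem2 => if elem2 ≠ e then product * elem2 else product) a
        = a * (m.filter (fun y => y ≠ e)).prod := by
  intro m
  induction m with
  | nil => intro a; simp
  | cons y m ih =>
    intro a
    rw [List.foldl_cons, ih, List.filter_cons]
    by_cases hy : y = e
    · simp [hy]
    · simp [hy, mul_assoc]

-- the product of the values differing from e, regrouped by distinct value
lemma pvFilter_prod (l : List Int) (e : Int) :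
    (l.filter (fun y => y ≠ e)).prod
      = (((PySem.Set.ofList l).erase e).map (fun k => k ^ l.count k)).prod := by
  have hd : (PySem.Set.ofList l).Nodup := PySem.Set.nodup_ofList l
  have hde : ((PySem.Set.ofList l).erase e).Nodup := hd.erase e
  rw [← List.prod_toFinset _ hde]
  rw [Finset.prod_list_count]
  have hset : (l.filter (fun y => y ≠ e)).toFinset = ((PySem.Set.ofList l).erase e).toFinset := by
    ext x
    simp [List.mem_toFinset, hd.mem_erase_iff, PySem.Set.mem_ofList, and_comm]
  rw [hset]
  apply Finset.prod_congr rfl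
  intro x hx
  have hxe : x ≠ e := by
    have := (List.mem_toFinset).mp hx
    exact (hd.mem_erase_iff.mp this).1
  rw [List.count_filter (by simp [hxe])]

-- B computes, for each element, the product of the other distinct values' grouped powers
lemma pvAlt_eq (l : List Int) :
    w_out_div_alt l
      = l.map (fun x => (((PySem.Set.ofList l).erase x).map
          (fun k => k ^ ((l.count k : Int)).toNat)).prod) := by
  unfold w_out_div_alt
  simp only
  rw [PySem.Dict.foldl_insert_getD_add_one_eq_counter, PySem.Dict.items_counter, List.map_map]
  simp only [Function.comp_def]
  apply List.map_congr_left
  intro x hx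
  rw [pvMemo_get (fun k => k ^ ((l.count k : Int)).toNat) (fun k => (l.count k : Int))
        (PySem.Set.ofList l) PySem.Dict.empty 1 x (PySem.Set.nodup_ofList l)]
  rw [if_pos ((PySem.Set.mem_ofList l x).mpr hx)]
  simp

-- ===== VERDICT (by name: the statement is the Claim_ definition above) =====
theorem w_out_div_spec : Claim_equal_w_out_div := by
  intro l _
  unfold Spec_w_out_div
  rw [pvAlt_eq]
  unfold w_out_div
  rw [PySem.List.foldl_append_singleton_eq_map]
  apply List.map_congr_left
  intro e _
  rw [pvInner_prod e l 1, one_mul, pvFilter_prod]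
  simp
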